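-- pv_equiv track=rewrite | github.com/ednarvaez/python-leetcode | apple_nvidia_validation_interview_questions.py | find_faulty_memory_bit
-- ===== SOURCE A (Python) =====
-- def find_faulty_memory_bit(good_value: int, faulty_value: int) -> int:
--     """
--     REAL HARDWARE DEBUG SCENARIO: "Find which bit is stuck/flipped in memory"
--
--     APPROACH: XOR the values to find differing bits
--     Then find position of the differing bit
--
--     HARDWARE CONTEXT:
--     - Single bit errors in RAM
--     - Stuck-at faults in memory cells
--     - Cosmic ray induced bit flips
--     """
--     # XOR reveals differing bits (1 where bits differ, 0 where same)
--     diff = good_value ^ faulty_value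
--
--     # Check if exactly one bit differs (single bit error)
--     if diff == 0:
--         return -1  # No difference
--
--     if (diff & (diff - 1)) != 0:
--         return -2  # Multiple bit errors
--
--     # Find position of the single differing bit
--     bit_position = 0
--     while diff > 1:
--         diff >>= 1
--         bit_position += 1
--
--     return bit_position
-- ===== SOURCE B (Python) =====
-- def find_faulty_memory_bit(good_value: int, faulty_value: int) -> int:
--     diff = good_value ^ faulty_value
--     if diff == 0:
--         return -1  # No difference
--     if (diff & (diff - 1)) != 0:
--         return -2  # Multiple bit errors (also any negative diff)
--     # diff is a positive power of two: bit index in closed form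
--     return diff.bit_length() - 1
-- ===== Notes on version B (the rewrite author's own statement) =====
-- stated objective: idiomatic
-- what changed: The while-shift loop counting the bit position is replaced by the closed form diff.bit_length() - 1; the two guards are kept unchanged.
import Mathlib
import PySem

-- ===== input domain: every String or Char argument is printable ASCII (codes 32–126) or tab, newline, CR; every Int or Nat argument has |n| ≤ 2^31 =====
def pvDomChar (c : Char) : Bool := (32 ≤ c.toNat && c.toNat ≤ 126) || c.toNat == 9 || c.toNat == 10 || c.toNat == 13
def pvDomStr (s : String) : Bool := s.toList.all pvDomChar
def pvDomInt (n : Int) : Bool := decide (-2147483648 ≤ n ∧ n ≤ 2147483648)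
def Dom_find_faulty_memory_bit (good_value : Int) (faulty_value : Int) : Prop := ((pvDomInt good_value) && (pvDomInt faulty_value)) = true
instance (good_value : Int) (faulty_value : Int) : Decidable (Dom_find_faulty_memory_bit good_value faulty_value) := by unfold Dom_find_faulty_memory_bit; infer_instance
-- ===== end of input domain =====

-- B replaces A's while-shift position-counting loop by the closed form diff.bit_length() - 1 (objective: idiomatic).

-- ===== PORT A =====
-- the 'while diff > 1: diff >>= 1; bit_position += 1' loop of A
def pvALoop (diff : Int) (bit_position : Int) : Int :=
  if diff > 1 then pvALoop (PySem.Int.floordiv diff 2) (bit_position + 1) else bit_position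
termination_by diff.toNat
decreasing_by
  have h2 : PySem.Int.floordiv diff 2 = diff / 2 := PySem.Int.floordiv_eq_ediv_of_pos (by omega)
  rw [h2]; omega

def find_faulty_memory_bit (good_value : Int) (faulty_value : Int) : Int :=
  let diff := PySem.Int.bxor good_value faulty_value
  if diff = 0 then -1
  else if PySem.Int.band diff (diff - 1) ≠ 0 then -2
  else pvALoop diff 0

-- ===== PORT B =====
def find_faulty_memory_bit_alt (good_value : Int) (faulty_value : Int) : Int :=
  let diff := PySem.Int.bxor good_value faulty_value
  if diff = 0 then -1
  else if PySem.Int.band diff (diff - 1) ≠ 0 then -2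
  else (PySem.Int.bitLength diff : Int) - 1

-- ===== PRECONDITION & SPEC =====
def Spec_find_faulty_memory_bit (good_value : Int) (faulty_value : Int) (out : Int) : Prop := out = find_faulty_memory_bit_alt good_value faulty_value
instance (good_value : Int) (faulty_value : Int) (out : Int) : Decidable (Spec_find_faulty_memory_bit good_value faulty_value out) := by unfold Spec_find_faulty_memory_bit; infer_instance

-- ===== CLAIM (what is proved, stated in full; the proofs are below) =====
def Claim_equal_find_faulty_memory_bit : Prop := ∀ (good_value : Int) (faulty_value : Int), Dom_find_faulty_memory_bit good_value faulty_value → Spec_find_faulty_memory_bit good_value faulty_value (find_faulty_memory_bit good_value faulty_value)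

-- ===== LEMMAS AND PROOFS =====

-- the AND of two negative ints is negative, so A/B's second guard fires on every negative diff
theorem pv_band_neg_neg (a b : Int) (ha : a < 0) (hb : b < 0) : PySem.Int.band a b < 0 := by
  unfold PySem.Int.band
  split_ifs <;> omega

-- A's counting loop computes bit_length - 1 on every positive diff
theorem pvALoop_eq_aux (n : Nat) : ∀ d : Int, d.toNat ≤ n → 0 < d → ∀ p : Int, pvALoop d p = ((PySem.Int.bitLength d : Int) - 1) + p := by
  induction n with
  | zero => intro d h hd; omega
  | succ n ih =>
    intro d h hd p
    rw [pvALoop]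
    by_cases hgt : d > 1
    · rw [if_pos hgt]
      have hfd : PySem.Int.floordiv d 2 = d / 2 := PySem.Int.floordiv_eq_ediv_of_pos (by omega)
      rw [ih (PySem.Int.floordiv d 2) (by rw [hfd]; omega) (by rw [hfd]; omega)]
      rw [PySem.Int.bitLength_of_pos hd]
      push_cast
      ring
    · rw [if_neg hgt]
      have h1 : d = 1 := by omega
      subst h1
      have hb : PySem.Int.bitLength 1 = 1 := by decide
      rw [hb]
      push_cast
      ring

theorem pvALoop_eq (d : Int) (hd : 0 < d) (p : Int) : pvALoop d p = ((PySem.Int.bitLength d : Int) - 1) + p :=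
  pvALoop_eq_aux d.toNat d le_rfl hd p

theorem find_faulty_memory_bit_spec : Claim_equal_find_faulty_memory_bit := by
  intro g f _
  unfold Spec_find_faulty_memory_bit find_faulty_memory_bit find_faulty_memory_bit_alt
  set diff := PySem.Int.bxor g f with hdiff
  by_cases h0 : diff = 0
  · simp [h0]
  · by_cases h1 : PySem.Int.band diff (diff - 1) ≠ 0
    · simp [h0, h1]
    · rw [not_not] at h1
      have hpos : 0 < diff := by
        rcases lt_trichotomy diff 0 with h | h | h
        · exact absurd h1 (by have := pv_band_neg_neg diff (diff - 1) h (by omega); omega)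
        · exact absurd h h0
        · exact h
      simp [h0, h1, pvALoop_eq diff hpos 0]
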